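-- pv_equiv track=rewrite | github.com/luliu31415926/google_code_jam | 2014_round1B/C.py | check_feasible
-- ===== SOURCE A (Python) =====
-- def bfs(node,visited_,edge_dict):
--     reachable=set()
--     q=deque([node])
--     while q:
--         cur=q.popleft()
--         reachable.add(cur)
--         visited_[cur]=True
--         for neighbor in edge_dict[cur]:
--             if not visited_[neighbor]: q.append(neighbor)
--     return reachable
--
-- def check_feasible(v,stack,edge_dict,visited):
--     # all nodes popped should be accesible to at least one of nodes left on stack
--     if stack[-1]==v: return True
--     visited_=visited[:]
--     reachable=set()
--     for i in range(len(stack)):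
--         if stack[i-1]==v:
--             p=i
--             break
--         reachable.update(bfs(stack[i],visited_,edge_dict))
--     for i in range(p,len(stack)):
--         if stack[i] not in reachable: return False
--     while stack[-1]!=v:
--         stack.pop()
--     return True
-- ===== SOURCE B (Python) =====
-- def check_feasible(v, stack, edge_dict, visited):
--     # Fixed-point saturation instead of queue BFS: repeatedly rescan the whole
--     # reached set, adding unvisited neighbours, until a full pass changes nothing.
--     # (Like the original, mutates `stack` by popping down to v on success;
--     # equivalence is about the return value.)
--     if stack[-1] == v:
--         return True
--     p = stack.index(v) + 1
--     reach = set(stack[:p])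
--     changed = True
--     while changed:
--         changed = False
--         for u in list(reach):
--             for nb in edge_dict[u]:
--                 if not visited[nb] and nb not in reach:
--                     reach.add(nb)
--                     changed = True
--     if any(node not in reach for node in stack[p:]):
--         return False
--     while stack[-1] != v:
--         stack.pop()
--     return True
-- ===== Notes on version B (the rewrite author's own statement) =====
-- stated objective: alternative
-- what changed: Replaces the per-seed queue-based BFS runs accumulated with set.update by a round-based fixed-point saturation: repeatedly rescan the whole reached set (seeded with set(stack[:p]), p found via stack.index(v)) adding unvisited neighbours until a full pass changes nothing, with no queue and no visited-array mutation.
import Mathlib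
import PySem

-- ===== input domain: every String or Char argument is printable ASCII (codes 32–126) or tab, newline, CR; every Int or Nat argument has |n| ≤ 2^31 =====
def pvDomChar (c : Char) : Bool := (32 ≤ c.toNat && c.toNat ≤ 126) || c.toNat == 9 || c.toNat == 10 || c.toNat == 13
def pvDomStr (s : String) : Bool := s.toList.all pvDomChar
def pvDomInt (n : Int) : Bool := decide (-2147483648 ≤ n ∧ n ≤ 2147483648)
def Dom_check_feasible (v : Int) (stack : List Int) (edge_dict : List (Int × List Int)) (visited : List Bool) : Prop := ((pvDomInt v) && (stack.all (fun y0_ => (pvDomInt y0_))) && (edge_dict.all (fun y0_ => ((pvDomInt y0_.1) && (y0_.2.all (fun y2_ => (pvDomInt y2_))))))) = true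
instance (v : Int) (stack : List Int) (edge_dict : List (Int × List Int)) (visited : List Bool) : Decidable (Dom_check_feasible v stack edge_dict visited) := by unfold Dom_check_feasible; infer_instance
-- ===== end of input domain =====

-- B replaces A's repeated queue-based BFS by a round-based fixed-point saturation of the reached
-- set. Equivalence is about the RETURN value only: the Python B pops `stack` down to v on success
-- (the same final while-pop mutation A's code performs when it runs); neither mutation is modelled
-- by these ports.

-- ===== PORT A =====
-- shared low-level helpers (exact Python semantics for edge_dict[x], visited[x], visited[x]=True)
def adjOf (edge_dict : List (Int × List Int)) (x : Int) : List Int :=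
  ((PySem.Dict.mk edge_dict).get? x).getD []   -- KeyError (get? = none) excluded by Pre_

def visGet (vis : List Bool) (x : Int) : Bool :=
  (PySem.List.pyGet? vis x).getD true          -- IndexError (pyGet? = none) excluded by Pre_

def visSet (vis : List Bool) (x : Int) : List Bool :=
  PySem.List.pySetD vis x true                 -- IndexError excluded by Pre_

-- termination measure machinery for the BFS while-loop (cited by `decreasing_by` below)
def unvisN (vis : List Bool) : Nat := vis.count false

theorem pyIdx?_lt' {n : Nat} {i : Int} {k : Nat} (h : PySem.List.pyIdx? n i = some k) :
    k < n := by
  unfold PySem.List.pyIdx? at h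
  split_ifs at h <;> simp_all <;> omega

theorem unvisN_visSet_lt (vis : List Bool) (c : Int) (h : visGet vis c = false) :
    unvisN (visSet vis c) < unvisN vis := by
  unfold visGet PySem.List.pyGet? at h
  unfold visSet PySem.List.pySetD PySem.List.pySet?
  cases hk : PySem.List.pyIdx? vis.length c with
  | none => rw [hk] at h; simp at h
  | some k =>
    rw [hk] at h
    simp only [Option.bind_some] at h
    have hkl : k < vis.length := pyIdx?_lt' hk
    have hv : vis[k]? = some false := by
      cases hg : vis[k]? with
      | none => rw [hg] at h; simp at h
      | some b => rw [hg] at h; simp at h; simp [h]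
    have hvk : vis[k] = false := by
      have := List.getElem?_eq_getElem hkl
      rw [this] at hv; exact Option.some.inj hv
    simp only [Option.map_some, Option.getD_some]
    unfold unvisN
    have hpos : 0 < vis.count false := by
      rw [List.count_pos_iff]
      exact hvk ▸ vis.getElem_mem hkl
    rw [List.count_set hkl, hvk,
      if_pos (by decide : ((false == false) = true)),
      if_neg (by decide : ¬ ((true == false) = true))]
    omega

def fMeas (edge_dict : List (Int × List Int)) (vis : List Bool) (x : Int) : Nat :=
  1 + (((adjOf edge_dict x).filter (fun nb => !(visGet (visSet vis x) nb))).attach.map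
        (fun nb => fMeas edge_dict (visSet vis x) nb.1)).sum
termination_by unvisN (visSet vis x)
decreasing_by
  have hm := nb.2
  have hf : visGet (visSet vis x) nb.1 = false := by
    have := List.of_mem_filter hm
    simpa using this
  exact unvisN_visSet_lt _ _ hf

def sumF (edge_dict : List (Int × List Int)) (vis : List Bool) (l : List Int) : Nat :=
  (l.map (fMeas edge_dict vis)).sum

theorem fMeas_eq (edge_dict : List (Int × List Int)) (vis : List Bool) (x : Int) :
    fMeas edge_dict vis x =
      1 + sumF edge_dict (visSet vis x)
            ((adjOf edge_dict x).filter (fun nb => !(visGet (visSet vis x) nb))) := by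
  rw [fMeas]
  unfold sumF
  rw [List.attach_map_val]

def vle (v w : List Bool) : Prop :=
  v.length = w.length ∧ ∀ y : Int, visGet w y = false → visGet v y = false

-- (index-arithmetic facts these termination lemmas rest on; proved in the proof section below
-- would be too late, so they are stated here and used by name)
theorem visGet_false_iff' (vis : List Bool) (y : Int) :
    visGet vis y = false ↔
      ∃ j, PySem.List.pyIdx? vis.length y = some j ∧ vis[j]? = some false := by
  unfold visGet PySem.List.pyGet?
  cases hk : PySem.List.pyIdx? vis.length y with
  | none => simp
  | some k =>
    simp only [Option.bind_some]
    cases hg : vis[k]? with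
    | none => simp [hg]
    | some b => cases b <;> simp [hg]

theorem visSet_of_idx' {vis : List Bool} {c : Int} {k : Nat}
    (h : PySem.List.pyIdx? vis.length c = some k) : visSet vis c = vis.set k true := by
  unfold visSet PySem.List.pySetD PySem.List.pySet?
  rw [h]; rfl

theorem visSet_of_none' {vis : List Bool} {c : Int}
    (h : PySem.List.pyIdx? vis.length c = none) : visSet vis c = vis := by
  unfold visSet PySem.List.pySetD PySem.List.pySet?
  rw [h]; rfl

theorem visGet_visSet_mono' {vis : List Bool} {c y : Int}
    (h : visGet (visSet vis c) y = false) : visGet vis y = false := by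
  cases hk : PySem.List.pyIdx? vis.length c with
  | none => rwa [visSet_of_none' hk] at h
  | some k =>
    rw [visSet_of_idx' hk] at h
    rw [visGet_false_iff'] at h ⊢
    obtain ⟨j, hj, hg⟩ := h
    rw [List.length_set] at hj
    refine ⟨j, hj, ?_⟩
    by_cases hkj : k = j
    · subst hkj
      rw [List.getElem?_set_self (pyIdx?_lt' hk)] at hg
      exact absurd hg (by simp)
    · rwa [List.getElem?_set_ne hkj] at hg

theorem length_visSet' (vis : List Bool) (c : Int) : (visSet vis c).length = vis.length :=
  PySem.List.length_pySetD vis c true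

theorem vle_visSet_self (vis : List Bool) (c : Int) : vle vis (visSet vis c) :=
  ⟨(length_visSet' vis c).symm, fun _ h => visGet_visSet_mono' h⟩

theorem vle_visSet {v w : List Bool} (h : vle v w) (x : Int) :
    vle (visSet v x) (visSet w x) := by
  obtain ⟨hl, himp⟩ := h
  refine ⟨by rw [length_visSet', length_visSet', hl], ?_⟩
  intro y hy
  cases hk : PySem.List.pyIdx? w.length x with
  | none =>
    have hkv : PySem.List.pyIdx? v.length x = none := by rw [hl]; exact hk
    rw [visSet_of_none' hk] at hy
    rw [visSet_of_none' hkv]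
    exact himp y hy
  | some k =>
    have hkv : PySem.List.pyIdx? v.length x = some k := by rw [hl]; exact hk
    rw [visSet_of_idx' hk] at hy
    rw [visSet_of_idx' hkv]
    rw [visGet_false_iff'] at hy ⊢
    obtain ⟨j, hj, hg⟩ := hy
    rw [List.length_set] at hj
    by_cases hkj : k = j
    · subst hkj
      rw [List.getElem?_set_self (pyIdx?_lt' hk)] at hg
      exact absurd hg (by simp)
    · rw [List.getElem?_set_ne hkj] at hg
      have hwy : visGet w y = false := (visGet_false_iff' w y).mpr ⟨j, hj, hg⟩
      have hvy := himp y hwy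
      rw [visGet_false_iff'] at hvy
      obtain ⟨j', hj', hg'⟩ := hvy
      have hjj : j' = j := by
        rw [hl] at hj'
        rw [hj'] at hj
        exact Option.some.inj hj
      subst hjj
      refine ⟨j', by rw [List.length_set, hl]; exact hj, ?_⟩
      rwa [List.getElem?_set_ne hkj]

theorem sumF_cons (edge_dict : List (Int × List Int)) (vis : List Bool) (x : Int)
    (l : List Int) :
    sumF edge_dict vis (x :: l) = fMeas edge_dict vis x + sumF edge_dict vis l := by
  simp [sumF]

theorem sumF_append (edge_dict : List (Int × List Int)) (vis : List Bool) (l1 l2 : List Int) :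
    sumF edge_dict vis (l1 ++ l2) = sumF edge_dict vis l1 + sumF edge_dict vis l2 := by
  simp [sumF]

theorem sumF_sublist (edge_dict : List (Int × List Int)) (vis : List Bool) {l1 l2 : List Int}
    (h : l1.Sublist l2) : sumF edge_dict vis l1 ≤ sumF edge_dict vis l2 :=
  (h.map (fMeas edge_dict vis)).sum_le_sum (fun _ _ => Nat.zero_le _)

theorem fMeas_mono_aux (edge_dict : List (Int × List Int)) :
    ∀ (N : Nat) (v w : List Bool) (x : Int), unvisN (visSet v x) < N → vle v w →
      fMeas edge_dict w x ≤ fMeas edge_dict v x := by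
  intro N
  induction N with
  | zero => intro v w x hN; exact absurd hN (Nat.not_lt_zero _)
  | succ N ih =>
    intro v w x hN hvw
    rw [fMeas_eq edge_dict w x, fMeas_eq edge_dict v x]
    have hvw' : vle (visSet v x) (visSet w x) := vle_visSet hvw x
    have hsub : (adjOf edge_dict x).filter (fun nb => !(visGet (visSet w x) nb)) |>.Sublist
        ((adjOf edge_dict x).filter (fun nb => !(visGet (visSet v x) nb))) := by
      apply List.monotone_filter_right
      intro a ha
      rw [Bool.not_eq_true'] at ha ⊢
      exact hvw'.2 a ha
    have h1 : sumF edge_dict (visSet w x)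
          ((adjOf edge_dict x).filter (fun nb => !(visGet (visSet w x) nb)))
        ≤ sumF edge_dict (visSet v x)
          ((adjOf edge_dict x).filter (fun nb => !(visGet (visSet w x) nb))) := by
      unfold sumF
      apply List.sum_le_sum
      intro nb hnb
      have hfw : visGet (visSet w x) nb = false := by
        have := List.of_mem_filter hnb
        simpa using this
      have hfv : visGet (visSet v x) nb = false := hvw'.2 nb hfw
      apply ih
      · have hlt := unvisN_visSet_lt (visSet v x) nb hfv
        omega
      · exact hvw'
    have h2 : sumF edge_dict (visSet v x)
          ((adjOf edge_dict x).filter (fun nb => !(visGet (visSet w x) nb)))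
        ≤ sumF edge_dict (visSet v x)
          ((adjOf edge_dict x).filter (fun nb => !(visGet (visSet v x) nb))) :=
      sumF_sublist edge_dict (visSet v x) hsub
    omega

theorem sumF_mono {v w : List Bool} (edge_dict : List (Int × List Int)) (h : vle v w)
    (l : List Int) : sumF edge_dict w l ≤ sumF edge_dict v l := by
  unfold sumF
  apply List.sum_le_sum
  intro x _
  exact fMeas_mono_aux edge_dict (unvisN (visSet v x) + 1) v w x (Nat.lt_succ_self _) h

theorem bfsLoop_dec (edge_dict : List (Int × List Int)) (cur : Int) (rest : List Int)
    (vis : List Bool) :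
    sumF edge_dict (visSet vis cur)
        (rest ++ (adjOf edge_dict cur).filter (fun nb => !(visGet (visSet vis cur) nb)))
      < sumF edge_dict vis (cur :: rest) := by
  rw [sumF_append, sumF_cons]
  have e3 := fMeas_eq edge_dict vis cur
  have e4 : sumF edge_dict (visSet vis cur) rest ≤ sumF edge_dict vis rest :=
    sumF_mono edge_dict (vle_visSet_self vis cur) rest
  omega

-- the BFS while-loop of A's `bfs`: pop cur, add to reachable, mark visited, append unvisited
-- neighbours
def bfsLoop (edge_dict : List (Int × List Int)) (q : List Int) (vis : List Bool)
    (reach : PySem.Set Int) : PySem.Set Int × List Bool :=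
  match q with
  | [] => (reach, vis)
  | cur :: rest =>
      bfsLoop edge_dict
        (rest ++ (adjOf edge_dict cur).filter (fun nb => !(visGet (visSet vis cur) nb)))
        (visSet vis cur) (PySem.Set.add reach cur)
termination_by sumF edge_dict vis q
decreasing_by exact bfsLoop_dec edge_dict cur rest vis

-- Python `bfs(node, visited_, edge_dict)`: returns `reachable`; mutation of visited_ is the 2nd component
def bfsA (node : Int) (visited_ : List Bool) (edge_dict : List (Int × List Int)) :
    PySem.Set Int × List Bool :=
  bfsLoop edge_dict [node] visited_ PySem.Set.empty

-- A's `for i in range(len(stack)): if stack[i-1]==v: p=i; break; reachable.update(bfs(...))`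
-- returns none when the loop ends without break (Python then raises NameError on `p`; outside Pre_)
def aFind (v : Int) (stack : List Int) (edge_dict : List (Int × List Int)) (i : Nat)
    (vis : List Bool) (reach : PySem.Set Int) : Option (Nat × PySem.Set Int) :=
  if i < stack.length then
    if PySem.List.pyGet? stack ((i : Int) - 1) = some v then some (i, reach)
    else
      let res := bfsA ((PySem.List.pyGet? stack (i : Int)).getD 0) vis edge_dict
      aFind v stack edge_dict (i + 1) res.2 (PySem.Set.update reach res.1)
  else none
termination_by stack.length - i

-- A's `for i in range(p, len(stack)): if stack[i] not in reachable: return False` then True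
def aCheck (stack : List Int) (reach : PySem.Set Int) (i : Nat) : Bool :=
  if i < stack.length then
    if !(PySem.Set.contains reach ((PySem.List.pyGet? stack (i : Int)).getD 0)) then false
    else aCheck stack reach (i + 1)
  else true
termination_by stack.length - i

def check_feasible (v : Int) (stack : List Int) (edge_dict : List (Int × List Int))
    (visited : List Bool) : Bool :=
  if PySem.List.pyGet? stack (-1) = some v then true
  else
    match aFind v stack edge_dict 0 visited PySem.Set.empty with
    | none => false                    -- Python: NameError (p never assigned); excluded by Pre_
    | some (p, reach) => aCheck stack reach p
      -- the trailing `while stack[-1]!=v: stack.pop()` only mutates `stack`; the return value is True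

-- ===== PORT B =====
-- B's inner `for nb in edge_dict[u]: if not visited[nb] and nb not in reach: reach.add(nb); changed=True`
def satNbs (visited : List Bool) (adj : List Int) (st : PySem.Set Int × Bool) :
    PySem.Set Int × Bool :=
  adj.foldl (fun st nb =>
    if !(visGet visited nb) && !(PySem.Set.contains st.1 nb)
    then (PySem.Set.add st.1 nb, true) else st) st

-- one full `for u in list(reach)` pass (snapshot is the round-start element list)
def satRound (edge_dict : List (Int × List Int)) (visited : List Bool) (snapshot : List Int)
    (st : PySem.Set Int × Bool) : PySem.Set Int × Bool :=
  snapshot.foldl (fun st u => satNbs visited (adjOf edge_dict u) st) st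

-- termination machinery for B's `while changed` loop (cited by `decreasing_by` below):
-- the reached set only grows, its new elements lie in the finite candidate window of
-- in-range (possibly negative) indices of `visited`, and a changed round adds one of them.
theorem satNbs_cons (visited : List Bool) (nb : Int) (adj : List Int)
    (st : PySem.Set Int × Bool) :
    satNbs visited (nb :: adj) st =
      satNbs visited adj
        (if !(visGet visited nb) && !(PySem.Set.contains st.1 nb)
         then (PySem.Set.add st.1 nb, true) else st) := rfl

theorem satNbs_mono (visited : List Bool) :
    ∀ (adj : List Int) (st : PySem.Set Int × Bool) (y : Int),
      y ∈ st.1 → y ∈ (satNbs visited adj st).1 := by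
  intro adj
  induction adj with
  | nil => intro st y hy; exact hy
  | cons nb adj ih =>
    intro st y hy
    rw [satNbs_cons]
    apply ih
    by_cases hc : (!(visGet visited nb) && !(PySem.Set.contains st.1 nb)) = true
    · rw [if_pos hc]
      exact (PySem.Set.mem_add _ _ _).mpr (Or.inl hy)
    · rw [if_neg hc]; exact hy

theorem satNbs_changed (visited : List Bool) :
    ∀ (adj : List Int) (st : PySem.Set Int × Bool),
      (satNbs visited adj st).2 = true →
        st.2 = true ∨ ∃ x, x ∈ (satNbs visited adj st).1 ∧ x ∉ st.1 ∧
          visGet visited x = false := by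
  intro adj
  induction adj with
  | nil => intro st h; exact Or.inl h
  | cons nb adj ih =>
    intro st h
    rw [satNbs_cons] at h ⊢
    by_cases hc : (!(visGet visited nb) && !(PySem.Set.contains st.1 nb)) = true
    · rw [if_pos hc] at h ⊢
      rw [Bool.and_eq_true, Bool.not_eq_true', Bool.not_eq_true'] at hc
      have hnb : nb ∉ st.1 := by
        intro hmem
        rw [(PySem.Set.contains_iff st.1 nb).mpr hmem] at hc
        exact absurd hc.2 (by simp)
      refine Or.inr ⟨nb, ?_, hnb, hc.1⟩
      apply satNbs_mono
      exact (PySem.Set.mem_add _ _ _).mpr (Or.inr rfl)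
    · rw [if_neg hc] at h ⊢
      exact ih st h

theorem satRound_cons (edge_dict : List (Int × List Int)) (visited : List Bool) (u : Int)
    (snap : List Int) (st : PySem.Set Int × Bool) :
    satRound edge_dict visited (u :: snap) st =
      satRound edge_dict visited snap (satNbs visited (adjOf edge_dict u) st) := rfl

theorem satRound_mono (edge_dict : List (Int × List Int)) (visited : List Bool) :
    ∀ (snap : List Int) (st : PySem.Set Int × Bool) (y : Int),
      y ∈ st.1 → y ∈ (satRound edge_dict visited snap st).1 := by
  intro snap
  induction snap with
  | nil => intro st y hy; exact hy
  | cons u snap ih =>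
    intro st y hy
    rw [satRound_cons]
    exact ih _ y (satNbs_mono visited _ st y hy)

theorem satRound_changed (edge_dict : List (Int × List Int)) (visited : List Bool) :
    ∀ (snap : List Int) (st : PySem.Set Int × Bool),
      (satRound edge_dict visited snap st).2 = true →
        st.2 = true ∨ ∃ x, x ∈ (satRound edge_dict visited snap st).1 ∧ x ∉ st.1 ∧
          visGet visited x = false := by
  intro snap
  induction snap with
  | nil => intro st h; exact Or.inl h
  | cons u snap ih =>
    intro st h
    rw [satRound_cons] at h ⊢
    rcases ih _ h with hflag | ⟨x, hx, hxn, hxv⟩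
    · rcases satNbs_changed visited _ st hflag with h1 | ⟨x, hx, hxn, hxv⟩
      · exact Or.inl h1
      · exact Or.inr ⟨x, satRound_mono edge_dict visited snap _ x hx, hxn, hxv⟩
    · refine Or.inr ⟨x, hx, ?_, hxv⟩
      intro hmem
      exact hxn (satNbs_mono visited _ st x hmem)

def candN (vis : List Bool) : List Int :=
  (List.range (2 * vis.length)).map (fun i : Nat => (i : Int) - vis.length)

def satMeas (vis : List Bool) (reach : PySem.Set Int) : Nat :=
  ((candN vis).filter (fun x => !(PySem.Set.contains reach x))).length

theorem pyIdx?_bounds {n : Nat} {i : Int} {k : Nat} (h : PySem.List.pyIdx? n i = some k) :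
    -(n : Int) ≤ i ∧ i < (n : Int) := by
  unfold PySem.List.pyIdx? at h
  split_ifs at h <;> simp_all <;> omega

theorem mem_candN_of_unvis {vis : List Bool} {x : Int} (h : visGet vis x = false) :
    x ∈ candN vis := by
  obtain ⟨j, hj, _⟩ := (visGet_false_iff' vis x).mp h
  obtain ⟨h1, h2⟩ := pyIdx?_bounds hj
  have hnn : (((x + (vis.length : Int)).toNat : Int)) = x + vis.length :=
    Int.toNat_of_nonneg (by omega)
  have hm : (x + (vis.length : Int)).toNat ∈ List.range (2 * vis.length) :=
    List.mem_range.mpr (by omega)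
  have hmap := List.mem_map_of_mem (f := fun i : Nat => (i : Int) - vis.length) hm
  have heq : ((((x + (vis.length : Int)).toNat) : Int) - vis.length) = x := by omega
  have hmap2 : ((((x + (vis.length : Int)).toNat) : Int) - vis.length) ∈ candN vis := by
    unfold candN
    exact hmap
  exact heq ▸ hmap2

theorem satLoop_dec (edge_dict : List (Int × List Int)) (visited : List Bool)
    (reach : PySem.Set Int)
    (h : (satRound edge_dict visited reach (reach, false)).2 = true) :
    satMeas visited (satRound edge_dict visited reach (reach, false)).1 <
      satMeas visited reach := by
  rcases satRound_changed edge_dict visited reach (reach, false) h with hflag | ⟨x, hx, hxn, hxv⟩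
  · exact absurd hflag (by simp)
  · unfold satMeas
    have hmono : ∀ y, y ∈ reach → y ∈ (satRound edge_dict visited reach (reach, false)).1 :=
      fun y hy => satRound_mono edge_dict visited reach (reach, false) y hy
    have hsub : ((candN visited).filter
          (fun y => !(PySem.Set.contains (satRound edge_dict visited reach (reach, false)).1 y))).Sublist
        ((candN visited).filter (fun y => !(PySem.Set.contains reach y))) := by
      apply List.monotone_filter_right
      intro a ha
      rw [Bool.not_eq_true'] at ha ⊢
      cases hb : PySem.Set.contains reach a with
      | false => rfl
      | true =>
        have hmem := hmono a ((PySem.Set.contains_iff reach a).mp hb)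
        rw [(PySem.Set.contains_iff _ a).mpr hmem] at ha
        exact absurd ha (by simp)
    have hxin1 : x ∈ (candN visited).filter (fun y => !(PySem.Set.contains reach y)) := by
      rw [List.mem_filter]
      refine ⟨mem_candN_of_unvis hxv, ?_⟩
      rw [Bool.not_eq_true']
      cases hb : PySem.Set.contains reach x with
      | false => rfl
      | true => exact absurd ((PySem.Set.contains_iff reach x).mp hb) hxn
    have hxout : x ∉ (candN visited).filter
        (fun y => !(PySem.Set.contains (satRound edge_dict visited reach (reach, false)).1 y)) := by
      rw [List.mem_filter]
      rintro ⟨-, hcx⟩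
      rw [Bool.not_eq_true'] at hcx
      rw [(PySem.Set.contains_iff _ x).mpr hx] at hcx
      exact absurd hcx (by simp)
    rcases lt_or_eq_of_le hsub.length_le with hlt | heq
    · exact hlt
    · exact absurd ((hsub.eq_of_length heq) ▸ hxin1) hxout

-- B's `while changed:` loop, one `satRound` per iteration over the round-start snapshot
def satLoop (edge_dict : List (Int × List Int)) (visited : List Bool)
    (reach : PySem.Set Int) : PySem.Set Int :=
  if h : (satRound edge_dict visited reach (reach, false)).2 then
    satLoop edge_dict visited (satRound edge_dict visited reach (reach, false)).1
  else (satRound edge_dict visited reach (reach, false)).1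
termination_by satMeas visited reach
decreasing_by exact satLoop_dec edge_dict visited reach h

def check_feasible_alt (v : Int) (stack : List Int) (edge_dict : List (Int × List Int))
    (visited : List Bool) : Bool :=
  if PySem.List.pyGet? stack (-1) = some v then true
  else
    match PySem.List.index? stack v with
    | none => false                    -- Python: ValueError from stack.index(v); excluded by Pre_
    | some k =>
      let reach := satLoop edge_dict visited (PySem.Set.ofList (stack.take (k + 1)))
      if (stack.drop (k + 1)).any (fun node => !(PySem.Set.contains reach node)) then false
      else true
      -- the trailing `while stack[-1]!=v: stack.pop()` only mutates `stack`; the return value is True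

-- ===== PRECONDITION & SPEC =====
def GoodNode (n : Nat) (x : Int) : Prop := 0 ≤ x ∧ x < (n : Int)

-- Pre_ excludes inputs on which A raises (empty stack: IndexError; v not in stack: NameError;
-- a traversed node that is no dict key or no index into visited: KeyError/IndexError), and inputs
-- whose node ids are not genuine indices 0 <= x < len(visited): there Python's negative-index
-- wraparound into `visited` makes the result depend on BFS visit order, an accident of A's
-- traversal order that no caller would specify. Because the set of traversed nodes is not closed
-- form, the key/range requirements are stated conservatively for all seeds and all adjacency
-- entries (slightly narrower than exactly the raising inputs).
def Pre_check_feasible (v : Int) (stack : List Int) (edge_dict : List (Int × List Int))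
    (visited : List Bool) : Prop :=
  stack ≠ [] ∧
  (stack.getLast? = some v ∨
    (v ∈ stack.dropLast ∧
     (∀ x ∈ stack.take (stack.dropLast.idxOf v + 1),
        GoodNode visited.length x ∧ ((PySem.Dict.mk edge_dict).get? x).isSome) ∧
     (∀ pr ∈ edge_dict, ∀ x ∈ pr.2,
        GoodNode visited.length x ∧
          (PySem.List.pyGet? visited x = some false →
            ((PySem.Dict.mk edge_dict).get? x).isSome))))

instance (v : Int) (stack : List Int) (edge_dict : List (Int × List Int)) (visited : List Bool) :
    Decidable (Pre_check_feasible v stack edge_dict visited) := by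
  unfold Pre_check_feasible GoodNode; infer_instance

def pvWitness_check_feasible : Int × List Int × (List (Int × List Int)) × List Bool :=
  (1, [0, 1, 2], [(0, [1]), (1, [2]), (2, [])], [false, false, false])

def Spec_check_feasible (v : Int) (stack : List Int) (edge_dict : List (Int × List Int))
    (visited : List Bool) (out : Bool) : Prop :=
  out = check_feasible_alt v stack edge_dict visited

instance (v : Int) (stack : List Int) (edge_dict : List (Int × List Int)) (visited : List Bool)
    (out : Bool) : Decidable (Spec_check_feasible v stack edge_dict visited out) := by
  unfold Spec_check_feasible; infer_instance

-- ===== CLAIM (what is proved, stated in full; the proofs are below) =====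
def Claim_equal_check_feasible : Prop := ∀ (v : Int) (stack : List Int) (edge_dict : List (Int × List Int)) (visited : List Bool), Dom_check_feasible v stack edge_dict visited → Pre_check_feasible v stack edge_dict visited → Spec_check_feasible v stack edge_dict visited (check_feasible v stack edge_dict visited)

-- ===== LEMMAS AND PROOFS =====

theorem pvWitness_ok :
    Pre_check_feasible pvWitness_check_feasible.1 pvWitness_check_feasible.2.1
      pvWitness_check_feasible.2.2.1 pvWitness_check_feasible.2.2.2 := by decide

-- ---- reachability characterisation shared by both ports ----

-- nonempty path u → … → x whose nodes after u all satisfy P (in the run: are initially unvisited)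
inductive Reaches (edge_dict : List (Int × List Int)) (P : Int → Prop) : Int → Int → Prop
  | base {u x : Int} : x ∈ adjOf edge_dict u → P x → Reaches edge_dict P u x
  | step {u y x : Int} : Reaches edge_dict P u y → x ∈ adjOf edge_dict y → P x →
      Reaches edge_dict P u x

def Wof (vis : List Bool) : Int → Prop := fun y => visGet vis y = false

def ClMem (edge_dict : List (Int × List Int)) (P : Int → Prop) (q : List Int) (x : Int) : Prop :=
  x ∈ q ∨ ∃ u ∈ q, Reaches edge_dict P u x

def EdgeGood (edge_dict : List (Int × List Int)) (n : Nat) : Prop :=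
  ∀ pr ∈ edge_dict, ∀ x ∈ pr.2, GoodNode n x

theorem mem_adjOf {edge_dict : List (Int × List Int)} {u x : Int}
    (h : x ∈ adjOf edge_dict u) : ∃ pr ∈ edge_dict, x ∈ pr.2 := by
  unfold adjOf PySem.Dict.get? at h
  cases hf : List.find? (fun p => p.1 == u) (PySem.Dict.mk edge_dict).items with
  | none => rw [hf] at h; simp at h
  | some pr =>
    rw [hf] at h
    simp only [Option.map_some, Option.getD_some] at h
    exact ⟨pr, List.mem_of_find?_eq_some hf, h⟩

theorem adjOf_good {edge_dict : List (Int × List Int)} {n : Nat} (he : EdgeGood edge_dict n)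
    {u x : Int} (h : x ∈ adjOf edge_dict u) : GoodNode n x := by
  obtain ⟨pr, hpr, hx⟩ := mem_adjOf h
  exact he pr hpr x hx

theorem Reaches_mono {edge_dict : List (Int × List Int)} {n : Nat} {P Q : Int → Prop}
    (he : EdgeGood edge_dict n) (h : ∀ y, GoodNode n y → P y → Q y) {u x : Int}
    (hr : Reaches edge_dict P u x) : Reaches edge_dict Q u x := by
  induction hr with
  | base hadj hp => exact .base hadj (h _ (adjOf_good he hadj) hp)
  | step _ hadj hp ih => exact .step ih hadj (h _ (adjOf_good he hadj) hp)

theorem Reaches_trans {edge_dict : List (Int × List Int)} {P : Int → Prop} {u y x : Int}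
    (h1 : Reaches edge_dict P u y) (h2 : Reaches edge_dict P y x) :
    Reaches edge_dict P u x := by
  induction h2 with
  | base hadj hp => exact .step h1 hadj hp
  | step _ hadj hp ih => exact .step ih hadj hp

theorem Cl_extend {edge_dict : List (Int × List Int)} {P : Int → Prop} {s y x : Int}
    (h : ClMem edge_dict P [s] y) (hadj : x ∈ adjOf edge_dict y) (hp : P x) :
    ClMem edge_dict P [s] x := by
  rcases h with h | ⟨u, hu, hr⟩
  · simp only [List.mem_singleton] at h
    subst h
    exact Or.inr ⟨y, List.mem_singleton.mpr rfl, .base hadj hp⟩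
  · simp only [List.mem_singleton] at hu
    subst hu
    exact Or.inr ⟨u, List.mem_singleton.mpr rfl, .step hr hadj hp⟩

-- index / visited-array lemmas
theorem visGet_false_iff (vis : List Bool) (y : Int) :
    visGet vis y = false ↔
      ∃ j, PySem.List.pyIdx? vis.length y = some j ∧ vis[j]? = some false :=
  visGet_false_iff' vis y

theorem visSet_of_idx {vis : List Bool} {c : Int} {k : Nat}
    (h : PySem.List.pyIdx? vis.length c = some k) : visSet vis c = vis.set k true :=
  visSet_of_idx' h

theorem pyIdx?_good {n : Nat} {x : Int} (h : GoodNode n x) :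
    PySem.List.pyIdx? n x = some x.toNat := by
  unfold PySem.List.pyIdx?
  rw [if_pos h.1, if_pos h.2]

theorem visGet_visSet_good {n : Nat} {vis : List Bool} {c y : Int} (hv : vis.length = n)
    (hc : GoodNode n c) (hy : GoodNode n y) :
    (visGet (visSet vis c) y = false ↔ (visGet vis y = false ∧ y ≠ c)) := by
  have hkc : PySem.List.pyIdx? vis.length c = some c.toNat := by rw [hv]; exact pyIdx?_good hc
  have hky : PySem.List.pyIdx? vis.length y = some y.toNat := by rw [hv]; exact pyIdx?_good hy
  rw [visSet_of_idx hkc, visGet_false_iff, visGet_false_iff]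
  have hlen : (vis.set c.toNat true).length = vis.length := List.length_set
  obtain ⟨hc0, hc1⟩ := hc
  obtain ⟨hy0, hy1⟩ := hy
  constructor
  · rintro ⟨j, hj, hg⟩
    rw [hlen, hky] at hj
    obtain rfl : y.toNat = j := Option.some.inj hj
    by_cases hcy : c.toNat = y.toNat
    · rw [hcy] at hg
      rw [List.getElem?_set_self (by rw [← hcy]; exact pyIdx?_lt' hkc)] at hg
      exact absurd hg (by simp)
    · rw [List.getElem?_set_ne hcy] at hg
      refine ⟨⟨y.toNat, hky, hg⟩, ?_⟩
      intro hyc; exact hcy (by rw [hyc])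
  · rintro ⟨⟨j, hj, hg⟩, hne⟩
    rw [hky] at hj
    obtain rfl : y.toNat = j := Option.some.inj hj
    refine ⟨y.toNat, by rw [hlen, hky], ?_⟩
    have hcy : c.toNat ≠ y.toNat := by
      intro hh
      exact hne (by omega)
    rwa [List.getElem?_set_ne hcy]

theorem mem_set_update {s : PySem.Set Int} {xs : List Int} {y : Int} :
    y ∈ PySem.Set.update s xs ↔ y ∈ s ∨ y ∈ xs := by
  induction xs generalizing s with
  | nil => simp [PySem.Set.update]
  | cons x xs ih =>
    show y ∈ PySem.Set.update (PySem.Set.add s x) xs ↔ _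
    rw [ih, PySem.Set.mem_add]
    simp
    tauto

-- the one-step exchange: popping cur turns seed list (cur :: rest) into (rest ++ appended),
-- with cur marked; closure membership is preserved
theorem step_fwd_aux {edge_dict : List (Int × List Int)} {n : Nat} {vis : List Bool} {cur : Int}
    (he : EdgeGood edge_dict n) (hv : vis.length = n) (hc : GoodNode n cur) (rest : List Int) :
    ∀ {u x : Int}, Reaches edge_dict (Wof vis) u x → (u = cur ∨ u ∈ rest) →
      x = cur ∨ ClMem edge_dict (Wof (visSet vis cur))
        (rest ++ (adjOf edge_dict cur).filter (fun nb => !(visGet (visSet vis cur) nb))) x := by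
  intro u x hr
  induction hr with
  | @base x hadj hPx =>
    intro hu
    by_cases hxc : x = cur
    · exact Or.inl hxc
    · have hWx' : Wof (visSet vis cur) x :=
        (visGet_visSet_good hv hc (adjOf_good he hadj)).mpr ⟨hPx, hxc⟩
      rcases hu with rfl | hu
      · refine Or.inr (Or.inl (List.mem_append_right _ ?_))
        rw [List.mem_filter, Bool.not_eq_true']
        exact ⟨hadj, hWx'⟩
      · exact Or.inr (Or.inr ⟨u, List.mem_append_left _ hu, .base hadj hWx'⟩)
  | @step y x hry hadj hPx ih =>
    intro hu
    by_cases hxc : x = cur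
    · exact Or.inl hxc
    · have hWx' : Wof (visSet vis cur) x :=
        (visGet_visSet_good hv hc (adjOf_good he hadj)).mpr ⟨hPx, hxc⟩
      rcases ih hu with rfl | hcl
      · refine Or.inr (Or.inl (List.mem_append_right _ ?_))
        rw [List.mem_filter, Bool.not_eq_true']
        exact ⟨hadj, hWx'⟩
      · rcases hcl with hmem | ⟨w, hw, hrw⟩
        · exact Or.inr (Or.inr ⟨y, hmem, .base hadj hWx'⟩)
        · exact Or.inr (Or.inr ⟨w, hw, .step hrw hadj hWx'⟩)

theorem step_set {edge_dict : List (Int × List Int)} {n : Nat} {vis : List Bool} {cur : Int}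
    (he : EdgeGood edge_dict n) (hv : vis.length = n) (hc : GoodNode n cur) (rest : List Int)
    (x : Int) :
    ClMem edge_dict (Wof vis) (cur :: rest) x ↔
      x = cur ∨ ClMem edge_dict (Wof (visSet vis cur))
        (rest ++ (adjOf edge_dict cur).filter (fun nb => !(visGet (visSet vis cur) nb))) x := by
  constructor
  · intro h
    rcases h with hmem | ⟨u, hu, hr⟩
    · rcases List.mem_cons.mp hmem with rfl | hmem2
      · exact Or.inl rfl
      · exact Or.inr (Or.inl (List.mem_append_left _ hmem2))
    · exact step_fwd_aux he hv hc rest hr (List.mem_cons.mp hu)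
  · intro h
    rcases h with rfl | h
    · exact Or.inl (List.mem_cons_self ..)
    · rcases h with hmem | ⟨u, hu, hr⟩
      · rcases List.mem_append.mp hmem with hmem | hmem
        · exact Or.inl (List.mem_cons_of_mem _ hmem)
        · rw [List.mem_filter, Bool.not_eq_true'] at hmem
          exact Or.inr ⟨cur, List.mem_cons_self ..,
            .base hmem.1 (visGet_visSet_mono' hmem.2)⟩
      · have hr' : Reaches edge_dict (Wof vis) u x :=
          Reaches_mono he (fun y _ hy => visGet_visSet_mono' hy) hr
        rcases List.mem_append.mp hu with hu | hu
        · exact Or.inr ⟨u, List.mem_cons_of_mem _ hu, hr'⟩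
        · rw [List.mem_filter, Bool.not_eq_true'] at hu
          exact Or.inr ⟨cur, List.mem_cons_self ..,
            Reaches_trans (.base hu.1 (visGet_visSet_mono' hu.2)) hr'⟩

-- bfsLoop computes exactly: reach ∪ closure(q, vis); visited gains exactly the closure's nodes
theorem bfsLoop_char {edge_dict : List (Int × List Int)} {n : Nat}
    (he : EdgeGood edge_dict n) :
    ∀ (q : List Int) (vis : List Bool) (reach : PySem.Set Int), vis.length = n →
      (∀ u ∈ q, GoodNode n u) →
      ((∀ x, x ∈ (bfsLoop edge_dict q vis reach).1 ↔
          x ∈ reach ∨ ClMem edge_dict (Wof vis) q x)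
       ∧ (∀ y : Int, GoodNode n y →
            (visGet (bfsLoop edge_dict q vis reach).2 y = false ↔
              visGet vis y = false ∧ ¬ ClMem edge_dict (Wof vis) q y))
       ∧ (bfsLoop edge_dict q vis reach).2.length = n) := by
  intro q vis reach
  induction q, vis, reach using bfsLoop.induct edge_dict with
  | case1 vis reach =>
    intro hv _
    have h0 : bfsLoop edge_dict [] vis reach = (reach, vis) := by rw [bfsLoop]
    rw [h0]
    refine ⟨fun x => ?_, fun y _ => ?_, hv⟩
    · simp [ClMem]
    · simp [ClMem]
  | case2 vis reach cur rest ih =>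
    intro hv hq
    have hc : GoodNode n cur := hq cur (List.mem_cons_self ..)
    have hv' : (visSet vis cur).length = n := by rw [length_visSet', hv]
    have hq' : ∀ u ∈ rest ++ (adjOf edge_dict cur).filter
        (fun nb => !(visGet (visSet vis cur) nb)), GoodNode n u := by
      intro u hu
      rcases List.mem_append.mp hu with hu | hu
      · exact hq u (List.mem_cons_of_mem _ hu)
      · exact adjOf_good he (List.mem_of_mem_filter hu)
    obtain ⟨iha, ihb, ihc⟩ := ih hv' hq'
    have hrw : bfsLoop edge_dict (cur :: rest) vis reach
        = bfsLoop edge_dict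
            (rest ++ (adjOf edge_dict cur).filter (fun nb => !(visGet (visSet vis cur) nb)))
            (visSet vis cur) (PySem.Set.add reach cur) := by
      rw [bfsLoop]
    refine ⟨fun x => ?_, fun y hy => ?_, by rw [hrw]; exact ihc⟩
    · rw [hrw, iha x, PySem.Set.mem_add, step_set he hv hc rest x]
      tauto
    · rw [hrw, ihb y hy, visGet_visSet_good hv hc hy, step_set he hv hc rest y]
      tauto

-- splitting a seed list: run the first seed, then the rest on the updated visited
theorem split_fwd_aux {edge_dict : List (Int × List Int)} {n : Nat} {P P2 : Int → Prop}
    {s : Int} (he : EdgeGood edge_dict n)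
    (hP2 : ∀ y, GoodNode n y → (P2 y ↔ P y ∧ ¬ ClMem edge_dict P [s] y)) :
    ∀ {u x : Int}, Reaches edge_dict P u x →
      ClMem edge_dict P [s] x ∨ Reaches edge_dict P2 u x := by
  intro u x hr
  induction hr with
  | @base x hadj hPx =>
    by_cases hcl : ClMem edge_dict P [s] x
    · exact Or.inl hcl
    · exact Or.inr (.base hadj ((hP2 x (adjOf_good he hadj)).mpr ⟨hPx, hcl⟩))
  | @step y x hry hadj hPx ih =>
    by_cases hcl : ClMem edge_dict P [s] x
    · exact Or.inl hcl
    · rcases ih with hy | hy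
      · exact Or.inl (Cl_extend hy hadj hPx)
      · exact Or.inr (.step hy hadj ((hP2 x (adjOf_good he hadj)).mpr ⟨hPx, hcl⟩))

theorem split_set {edge_dict : List (Int × List Int)} {n : Nat} {P P2 : Int → Prop} {s : Int}
    (he : EdgeGood edge_dict n) (hs : GoodNode n s)
    (hP2 : ∀ y, GoodNode n y → (P2 y ↔ P y ∧ ¬ ClMem edge_dict P [s] y)) (S : List Int)
    (x : Int) :
    ClMem edge_dict P (s :: S) x ↔ ClMem edge_dict P [s] x ∨ ClMem edge_dict P2 S x := by
  constructor
  · intro h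
    rcases h with hmem | ⟨u, hu, hr⟩
    · rcases List.mem_cons.mp hmem with rfl | hmem2
      · exact Or.inl (Or.inl (List.mem_singleton.mpr rfl))
      · exact Or.inr (Or.inl hmem2)
    · rcases List.mem_cons.mp hu with rfl | hu2
      · exact Or.inl (Or.inr ⟨u, List.mem_singleton.mpr rfl, hr⟩)
      · rcases split_fwd_aux he hP2 hr with hcl | hr2
        · exact Or.inl hcl
        · exact Or.inr (Or.inr ⟨u, hu2, hr2⟩)
  · intro h
    rcases h with h | h
    · rcases h with hmem | ⟨u, hu, hr⟩
      · rw [List.mem_singleton] at hmem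
        exact Or.inl (hmem ▸ List.mem_cons_self ..)
      · rw [List.mem_singleton] at hu
        subst hu
        exact Or.inr ⟨u, List.mem_cons_self .., hr⟩
    · rcases h with hmem | ⟨u, hu, hr⟩
      · exact Or.inl (List.mem_cons_of_mem _ hmem)
      · exact Or.inr ⟨u, List.mem_cons_of_mem _ hu,
          Reaches_mono he (fun y hy hP2y => ((hP2 y hy).mp hP2y).1) hr⟩

-- A's accumulation loop: sequential per-seed BFS over stack[i..p-1] reaches the same closure
theorem aFind_char {v : Int} {stack : List Int} {edge_dict : List (Int × List Int)} {n : Nat}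
    (he : EdgeGood edge_dict n) {p : Nat} (hp : p < stack.length)
    (hhit : PySem.List.pyGet? stack ((p : Int) - 1) = some v) :
    ∀ (i : Nat) (vis : List Bool) (reach : PySem.Set Int), i ≤ p → vis.length = n →
      (∀ j, i ≤ j → j < p → ¬ (PySem.List.pyGet? stack ((j : Int) - 1) = some v)) →
      (∀ u ∈ (stack.take p).drop i, GoodNode n u) →
      ∃ R, aFind v stack edge_dict i vis reach = some (p, R) ∧
        ∀ x, (x ∈ R ↔ x ∈ reach ∨ ClMem edge_dict (Wof vis) ((stack.take p).drop i) x) := by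
  intro i
  induction hN : p - i using Nat.strong_induction_on generalizing i with
  | _ N ihN =>
    intro vis reach hip hv hmiss hgood
    have hi : i < stack.length := lt_of_le_of_lt hip hp
    rw [aFind, if_pos hi]
    by_cases hieq : i = p
    · subst hieq
      rw [if_pos hhit]
      refine ⟨reach, rfl, fun x => ?_⟩
      rw [List.drop_eq_nil_of_le (by rw [List.length_take]; omega)]
      simp [ClMem]
    · have hilt : i < p := lt_of_le_of_ne hip hieq
      rw [if_neg (hmiss i le_rfl hilt)]
      have htl : i < (stack.take p).length := by rw [List.length_take]; omega
      have hseg : (stack.take p).drop i = stack[i] :: (stack.take p).drop (i + 1) := by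
        rw [List.drop_eq_getElem_cons htl, List.getElem_take]
      have hget : (PySem.List.pyGet? stack (i : Int)).getD 0 = stack[i] := by
        rw [PySem.List.pyGet?_natCast, List.getElem?_eq_getElem hi]
        rfl
      rw [hget]
      have hsg : GoodNode n stack[i] := by
        apply hgood
        rw [hseg]
        exact List.mem_cons_self ..
      -- characterise the single-seed BFS run
      obtain ⟨cha, chb, chc⟩ := bfsLoop_char he [stack[i]] vis PySem.Set.empty hv
        (by intro u hu; rw [List.mem_singleton] at hu; exact hu ▸ hsg)
      -- recurse
      obtain ⟨R, hRfind, hRmem⟩ :=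
        ihN (p - (i + 1)) (by omega) (i + 1) rfl
          (bfsLoop edge_dict [stack[i]] vis PySem.Set.empty).2
          (PySem.Set.update reach (bfsLoop edge_dict [stack[i]] vis PySem.Set.empty).1)
          hilt chc
          (fun j hj1 hj2 => hmiss j (by omega) hj2)
          (by intro u hu; apply hgood; rw [hseg]; exact List.mem_cons_of_mem _ hu)
      refine ⟨R, hRfind, fun x => ?_⟩
      rw [hRmem x, hseg]
      rw [split_set (P := Wof vis)
            (P2 := Wof (bfsLoop edge_dict [stack[i]] vis PySem.Set.empty).2)
            he hsg (fun y hy => chb y hy) ((stack.take p).drop (i + 1)) x]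
      rw [mem_set_update, cha x]
      have hemp : (x ∈ (PySem.Set.empty : PySem.Set Int)) ↔ False := by
        simp [PySem.Set.empty]
      tauto

theorem aCheck_eq (stack : List Int) (reach : PySem.Set Int) :
    ∀ i : Nat, aCheck stack reach i =
      !((stack.drop i).any (fun node => !(PySem.Set.contains reach node))) := by
  intro i
  induction hN : stack.length - i using Nat.strong_induction_on generalizing i with
  | _ N ih =>
    rw [aCheck]
    by_cases hlt : i < stack.length
    · rw [if_pos hlt, List.drop_eq_getElem_cons hlt, List.any_cons]
      have hget : (PySem.List.pyGet? stack (i : Int)).getD 0 = stack[i] := by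
        rw [PySem.List.pyGet?_natCast, List.getElem?_eq_getElem hlt]
        rfl
      rw [hget]
      cases hc : PySem.Set.contains reach stack[i] with
      | false => simp
      | true =>
        simp only [Bool.not_true, Bool.false_or]
        rw [if_neg (by simp)]
        exact ih (stack.length - (i + 1)) (by omega) (i + 1) rfl
    · rw [if_neg hlt, List.drop_eq_nil_of_le (by omega)]
      simp

theorem idxOf?_of_mem {l : List Int} {v : Int} (h : v ∈ l) :
    List.idxOf? v l = some (List.idxOf v l) := by
  induction l with
  | nil => exact absurd h (List.not_mem_nil)
  | cons a l ih =>
    rw [List.idxOf?_cons, List.idxOf_cons]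
    by_cases hav : a == v
    · rw [if_pos hav, hav]
      rfl
    · rw [if_neg hav, Bool.cond_eq_ite, if_neg (by simpa using hav)]
      have hmem : v ∈ l := by
        rcases List.mem_cons.mp h with rfl | hm
        · exact absurd (beq_self_eq_true v) hav
        · exact hm
      rw [ih hmem]
      rfl

-- ---- B's saturation loop computes the same closure ----

theorem satNbs_flag (visited : List Bool) :
    ∀ (adj : List Int) (st : PySem.Set Int × Bool), st.2 = true →
      (satNbs visited adj st).2 = true := by
  intro adj
  induction adj with
  | nil => intro st h; exact h
  | cons nb adj ih =>
    intro st h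
    rw [satNbs_cons]
    apply ih
    by_cases hc : (!(visGet visited nb) && !(PySem.Set.contains st.1 nb)) = true
    · rw [if_pos hc]
    · rw [if_neg hc]; exact h

theorem satNbs_sub (visited : List Bool) :
    ∀ (adj : List Int) (st : PySem.Set Int × Bool) (x : Int),
      x ∈ (satNbs visited adj st).1 →
        x ∈ st.1 ∨ (visGet visited x = false ∧ x ∈ adj) := by
  intro adj
  induction adj with
  | nil => intro st x hx; exact Or.inl hx
  | cons nb adj ih =>
    intro st x hx
    rw [satNbs_cons] at hx
    by_cases hc : (!(visGet visited nb) && !(PySem.Set.contains st.1 nb)) = true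
    · rw [if_pos hc] at hx
      rcases ih _ x hx with hx1 | ⟨hu, hmem⟩
      · rcases (PySem.Set.mem_add _ _ _).mp hx1 with h1 | h1
        · exact Or.inl h1
        · subst h1
          rw [Bool.and_eq_true, Bool.not_eq_true', Bool.not_eq_true'] at hc
          exact Or.inr ⟨hc.1, List.mem_cons_self ..⟩
      · exact Or.inr ⟨hu, List.mem_cons_of_mem _ hmem⟩
    · rw [if_neg hc] at hx
      rcases ih _ x hx with hx1 | ⟨hu, hmem⟩
      · exact Or.inl hx1
      · exact Or.inr ⟨hu, List.mem_cons_of_mem _ hmem⟩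

theorem satNbs_unchanged (visited : List Bool) :
    ∀ (adj : List Int) (st : PySem.Set Int × Bool),
      (satNbs visited adj st).2 = false →
        satNbs visited adj st = st ∧
          ∀ nb ∈ adj, visGet visited nb = false → nb ∈ st.1 := by
  intro adj
  induction adj with
  | nil => intro st _; exact ⟨rfl, by simp⟩
  | cons nb adj ih =>
    intro st h
    rw [satNbs_cons] at h ⊢
    by_cases hc : (!(visGet visited nb) && !(PySem.Set.contains st.1 nb)) = true
    · rw [if_pos hc] at h
      rw [satNbs_flag visited adj (PySem.Set.add st.1 nb, true) rfl] at h
      exact absurd h (by simp)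
    · rw [if_neg hc] at h ⊢
      obtain ⟨heq, hcl⟩ := ih st h
      refine ⟨heq, ?_⟩
      intro nb' hnb' hv
      rcases List.mem_cons.mp hnb' with rfl | hnb'
      · have hcf : (!(visGet visited nb') && !(PySem.Set.contains st.1 nb')) = false := by
          cases hb : (!(visGet visited nb') && !(PySem.Set.contains st.1 nb')) with
          | false => rfl
          | true => exact absurd hb hc
        rw [hv] at hcf
        simp only [Bool.not_false, Bool.true_and, Bool.not_eq_false'] at hcf
        exact (PySem.Set.contains_iff st.1 nb').mp hcf
      · exact hcl nb' hnb' hv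

theorem satRound_sub (edge_dict : List (Int × List Int)) (visited : List Bool) :
    ∀ (snap : List Int) (st : PySem.Set Int × Bool) (x : Int),
      x ∈ (satRound edge_dict visited snap st).1 →
        x ∈ st.1 ∨ ∃ u ∈ snap, visGet visited x = false ∧ x ∈ adjOf edge_dict u := by
  intro snap
  induction snap with
  | nil => intro st x hx; exact Or.inl hx
  | cons u snap ih =>
    intro st x hx
    rw [satRound_cons] at hx
    rcases ih _ x hx with hx1 | ⟨u', hu', hp⟩
    · rcases satNbs_sub visited _ st x hx1 with h1 | ⟨hv, hadj⟩
      · exact Or.inl h1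
      · exact Or.inr ⟨u, List.mem_cons_self .., hv, hadj⟩
    · exact Or.inr ⟨u', List.mem_cons_of_mem _ hu', hp⟩

theorem satRound_flag (edge_dict : List (Int × List Int)) (visited : List Bool) :
    ∀ (snap : List Int) (st : PySem.Set Int × Bool), st.2 = true →
      (satRound edge_dict visited snap st).2 = true := by
  intro snap
  induction snap with
  | nil => intro st h; exact h
  | cons u snap ih =>
    intro st h
    rw [satRound_cons]
    exact ih _ (satNbs_flag visited _ st h)

theorem satRound_unchanged (edge_dict : List (Int × List Int)) (visited : List Bool) :
    ∀ (snap : List Int) (st : PySem.Set Int × Bool),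
      (satRound edge_dict visited snap st).2 = false →
        satRound edge_dict visited snap st = st ∧
          ∀ u ∈ snap, ∀ nb ∈ adjOf edge_dict u, visGet visited nb = false → nb ∈ st.1 := by
  intro snap
  induction snap with
  | nil => intro st _; exact ⟨rfl, by simp⟩
  | cons u snap ih =>
    intro st h
    rw [satRound_cons] at h ⊢
    have hflag : (satNbs visited (adjOf edge_dict u) st).2 = false := by
      cases hb : (satNbs visited (adjOf edge_dict u) st).2 with
      | false => rfl
      | true =>
        rw [satRound_flag edge_dict visited snap _ hb] at h
        exact absurd h (by simp)
    obtain ⟨heq2, hcl2⟩ := satNbs_unchanged visited _ st hflag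
    rw [heq2] at h ⊢
    obtain ⟨heq, hcl⟩ := ih st h
    refine ⟨heq, ?_⟩
    intro u' hu' nb hnb hv
    rcases List.mem_cons.mp hu' with rfl | hu'
    · exact hcl2 nb hnb hv
    · exact hcl u' hu' nb hnb hv


theorem ClMem_mono_q {edge_dict : List (Int × List Int)} {P : Int → Prop} {q1 q2 : List Int}
    (h : ∀ y ∈ q1, y ∈ q2) {x : Int} (hc : ClMem edge_dict P q1 x) :
    ClMem edge_dict P q2 x := by
  rcases hc with hm | ⟨u, hu, hr⟩
  · exact Or.inl (h x hm)
  · exact Or.inr ⟨u, h u hu, hr⟩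

theorem ClMem_absorb {edge_dict : List (Int × List Int)} {P : Int → Prop} {q1 q2 : List Int}
    (h : ∀ y ∈ q2, y ∈ q1 ∨ ∃ u ∈ q1, Reaches edge_dict P u y) {x : Int}
    (hc : ClMem edge_dict P q2 x) : ClMem edge_dict P q1 x := by
  rcases hc with hm | ⟨y, hy, hr⟩
  · rcases h x hm with h1 | ⟨u, hu, hr⟩
    · exact Or.inl h1
    · exact Or.inr ⟨u, hu, hr⟩
  · rcases h y hy with h1 | ⟨u, hu, huy⟩
    · exact Or.inr ⟨y, h1, hr⟩
    · exact Or.inr ⟨u, hu, Reaches_trans huy hr⟩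

theorem Reaches_mem_of_closed {edge_dict : List (Int × List Int)} {P : Int → Prop}
    {reach : List Int}
    (hc : ∀ u ∈ reach, ∀ nb ∈ adjOf edge_dict u, P nb → nb ∈ reach) {u x : Int}
    (hu : u ∈ reach) (hr : Reaches edge_dict P u x) : x ∈ reach := by
  induction hr with
  | base hadj hp => exact hc _ hu _ hadj hp
  | step _ hadj hp ih => exact hc _ ih _ hadj hp

theorem satLoop_mem (edge_dict : List (Int × List Int)) (visited : List Bool) :
    ∀ (reach : PySem.Set Int) (x : Int),
      x ∈ satLoop edge_dict visited reach ↔ ClMem edge_dict (Wof visited) reach x := by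
  intro reach
  induction hN : satMeas visited reach using Nat.strong_induction_on generalizing reach with
  | _ N ihN =>
    intro x
    rw [satLoop]
    by_cases hch : (satRound edge_dict visited reach (reach, false)).2 = true
    · rw [dif_pos hch]
      rw [ihN (satMeas visited (satRound edge_dict visited reach (reach, false)).1)
            (by rw [← hN]; exact satLoop_dec edge_dict visited reach hch) _ rfl]
      constructor
      · apply ClMem_absorb
        intro y hy
        rcases satRound_sub edge_dict visited reach (reach, false) y hy with h1 | ⟨u, hu, hv, hadj⟩
        · exact Or.inl h1
        · exact Or.inr ⟨u, hu, .base hadj hv⟩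
      · apply ClMem_mono_q
        exact fun y hy => satRound_mono edge_dict visited reach (reach, false) y hy
    · rw [dif_neg hch]
      have hf : (satRound edge_dict visited reach (reach, false)).2 = false := by
        cases hb : (satRound edge_dict visited reach (reach, false)).2 with
        | false => rfl
        | true => exact absurd hb hch
      obtain ⟨heq, hcl⟩ := satRound_unchanged edge_dict visited reach (reach, false) hf
      rw [heq]
      constructor
      · exact fun h => Or.inl h
      · intro h
        rcases h with hm | ⟨u, hu, hr⟩
        · exact hm
        · exact Reaches_mem_of_closed hcl hu hr

theorem main_equal (v : Int) (stack : List Int) (edge_dict : List (Int × List Int))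
    (visited : List Bool) (hpre : Pre_check_feasible v stack edge_dict visited) :
    check_feasible v stack edge_dict visited = check_feasible_alt v stack edge_dict visited := by
  unfold check_feasible check_feasible_alt
  by_cases h1 : PySem.List.pyGet? stack (-1) = some v
  · rw [if_pos h1, if_pos h1]
  · rw [if_neg h1, if_neg h1]
    obtain ⟨hne, hdisj⟩ := hpre
    have hlast : ¬(stack.getLast? = some v) := by
      rwa [PySem.List.pyGet?_neg_one] at h1
    rcases hdisj with h | ⟨hmem, hseeds, hedges⟩
    · exact absurd h hlast
    set n := visited.length with hn
    set k0 := stack.dropLast.idxOf v with hk0def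
    have hmemfull : v ∈ stack := List.mem_of_mem_dropLast hmem
    have hidxdl : PySem.List.index? stack.dropLast v = some k0 := by
      rw [PySem.List.index?_eq_idxOf?]
      exact idxOf?_of_mem hmem
    have hidxq : PySem.List.index? stack v = some k0 := by
      conv_lhs => rw [← List.dropLast_append_getLast hne]
      rw [PySem.List.index?_append_of_mem _ hmem]
      exact hidxdl
    obtain ⟨hk0lt, hk0v, hk0min⟩ := PySem.List.getElem_of_index?_eq_some hidxdl
    have hdll : stack.dropLast.length = stack.length - 1 := List.length_dropLast
    have hlen1 : 0 < stack.length := List.length_pos_of_ne_nil hne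
    have hplt : k0 + 1 < stack.length := by omega
    have hhit : PySem.List.pyGet? stack ((↑(k0 + 1) : Int) - 1) = some v := by
      have hc : ((↑(k0 + 1) : Int) - 1) = ((k0 : Nat) : Int) := by push_cast; ring
      rw [hc, PySem.List.pyGet?_natCast,
        List.getElem?_eq_getElem (by omega : k0 < stack.length)]
      have : stack[k0] = v := by
        rw [← List.getElem_dropLast hk0lt]
        exact hk0v
      rw [this]
    have hmiss : ∀ j, 0 ≤ j → j < k0 + 1 →
        ¬(PySem.List.pyGet? stack ((j : Int) - 1) = some v) := by
      intro j _ hj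
      match j with
      | 0 =>
        intro hcon
        exact h1 (by simpa using hcon)
      | j + 1 =>
        intro hcon
        have hc : ((↑(j + 1) : Int) - 1) = ((j : Nat) : Int) := by push_cast; ring
        rw [hc, PySem.List.pyGet?_natCast,
          List.getElem?_eq_getElem (by omega : j < stack.length)] at hcon
        have hj' : j < k0 := by omega
        apply hk0min j hj'
        rw [List.getElem_dropLast]
        exact Option.some.inj hcon
    have he : EdgeGood edge_dict n := fun pr hpr x hx => (hedges pr hpr x hx).1
    have hgoodseeds : ∀ u ∈ stack.take (k0 + 1), GoodNode n u := by
      intro u hu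
      exact (hseeds u hu).1
    obtain ⟨R, hRfind, hRmem⟩ :=
      aFind_char (v := v) (stack := stack) he hplt hhit 0 visited PySem.Set.empty
        (Nat.zero_le _) rfl (fun j hj1 hj2 => hmiss j hj1 hj2)
        (by rw [List.drop_zero]; exact hgoodseeds)
    rw [hRfind, hidxq]
    have hmemeq : ∀ x : Int, (x ∈ R) ↔
        x ∈ satLoop edge_dict visited (PySem.Set.ofList (stack.take (k0 + 1))) := by
      intro x
      rw [hRmem x, List.drop_zero, satLoop_mem]
      have hemp : (x ∈ (PySem.Set.empty : PySem.Set Int)) ↔ False := by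
        simp [PySem.Set.empty]
      constructor
      · intro h
        rcases h with h | h
        · exact absurd h (by simpa using hemp)
        · exact ClMem_mono_q (fun y hy => (PySem.Set.mem_ofList _ _).mpr hy) h
      · intro h
        exact Or.inr (ClMem_mono_q (fun y hy => (PySem.Set.mem_ofList _ _).mp hy) h)
    have hcont : ∀ x : Int, PySem.Set.contains R x =
        PySem.Set.contains (satLoop edge_dict visited (PySem.Set.ofList (stack.take (k0 + 1)))) x := by
      intro x
      unfold PySem.Set.contains
      rw [Bool.eq_iff_iff, List.contains_iff_mem, List.contains_iff_mem]
      exact hmemeq x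
    show aCheck stack R (k0 + 1) = _
    rw [aCheck_eq]
    have hany : (stack.drop (k0 + 1)).any (fun node => !(PySem.Set.contains R node)) =
        (stack.drop (k0 + 1)).any (fun node =>
          !(PySem.Set.contains
              (satLoop edge_dict visited (PySem.Set.ofList (stack.take (k0 + 1)))) node)) :=
      List.any_congr rfl (fun a => by rw [hcont a])
    rw [hany]
    show _ = if ((stack.drop (k0 + 1)).any (fun node =>
        !(PySem.Set.contains
            (satLoop edge_dict visited (PySem.Set.ofList (stack.take (k0 + 1)))) node))) = true
      then false else true
    cases hres : (stack.drop (k0 + 1)).any (fun node =>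
        !(PySem.Set.contains
            (satLoop edge_dict visited (PySem.Set.ofList (stack.take (k0 + 1)))) node)) <;> simp

-- ===== VERDICT (by name: the statement is the Claim_ definition above) =====
theorem check_feasible_spec : Claim_equal_check_feasible := by
  intro v stack edge_dict visited _ hpre
  exact main_equal v stack edge_dict visited hpre
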